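-- pv_equiv track=rewrite | github.com/Chelovecki/ege_bk | exams/kompege/benjamin 2024-03-31 25028626 46/5_10021.py | f
-- ===== SOURCE A (Python) =====
-- def f(n: int):
--     bin_n = bin(n)[2:]
--     new_bin = ''
--     if bin_n.count('0') > bin_n.count('1'):
--         for r in bin_n:
--             if r == '1':
--                 new_bin += '0'
--             else:
--                 new_bin += '1'
--
--     elif bin_n.count('0') <= bin_n.count('1'):
--         for num, r in enumerate(bin_n):
--             if num % 2 == 0:
--                 new_bin += '1'
--             else:
--                 new_bin += r
--
--     return int(new_bin, 2)
-- ===== SOURCE B (Python) =====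
-- def f(n: int):
--     L = max(n.bit_length(), 1)
--     ones = bin(n).count('1')
--     if L - ones > ones:
--         return (1 << L) - 1 - n
--     mask = 0
--     for i in range(0, L, 2):
--         mask |= 1 << (L - 1 - i)
--     return n | mask
-- ===== Notes on version B (the rewrite author's own statement) =====
-- stated objective: simpler
-- what changed: B replaces A's two character-string-building loops and re-parsing with closed-form integer bit arithmetic: bit-length complement (1<<L)-1-n for the invert branch, and n | mask with a mask of the even-string-index bits for the force-ones branch.
-- outside the precondition, e.g. on f(-1): A returns 3, B returns -1; on f(-6): A returns 14, B returns -1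
import Mathlib
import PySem

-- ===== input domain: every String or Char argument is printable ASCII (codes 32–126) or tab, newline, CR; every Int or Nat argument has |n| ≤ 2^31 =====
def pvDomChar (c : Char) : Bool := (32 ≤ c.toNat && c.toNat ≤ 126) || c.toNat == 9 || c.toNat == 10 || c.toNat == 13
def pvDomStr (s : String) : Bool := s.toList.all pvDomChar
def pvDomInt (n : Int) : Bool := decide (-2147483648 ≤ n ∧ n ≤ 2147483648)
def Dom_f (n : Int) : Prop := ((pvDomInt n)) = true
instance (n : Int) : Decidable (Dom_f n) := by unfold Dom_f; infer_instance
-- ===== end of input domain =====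

-- B replaces A's two character-string-building loops with closed-form integer bit
-- arithmetic (bit-length complement / OR with an even-index mask); same values on all n ≥ 0.


-- ===== PORT A =====
-- int(new_bin, 2) is ported by hand as a base-2 digit fold; this is exact here because on
-- every int input the reachable new_bin is nonempty and consists of '0'/'1' characters only
-- (both of A's loops append only '0' or '1').
def pvInt2 (cs : List Char) : Int :=
  cs.foldl (fun a c => 2 * a + (if c = '1' then 1 else 0)) 0

def f (n : Int) : Int :=
  -- bin_n = bin(n)[2:]
  let bin_n : List Char := PySem.List.slice (PySem.Int.toBinChars0b n) (some 2) none
  if bin_n.count '0' > bin_n.count '1' then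
    pvInt2 (bin_n.foldl (fun acc r => acc ++ [if r = '1' then '0' else '1']) [])
  else if bin_n.count '0' ≤ bin_n.count '1' then
    pvInt2 ((PySem.List.enumerate bin_n).foldl
      (fun acc p => acc ++ [if PySem.Int.mod p.1 2 = 0 then '1' else p.2]) [])
  else pvInt2 []  -- unreachable: the two conditions are exhaustive

-- ===== PORT B =====
def f_alt (n : Int) : Int :=
  let L : Nat := max (PySem.Int.bitLength n) 1
  let ones : Nat := PySem.Int.bitCount n        -- bin(n).count('1')
  if (L : Int) - (ones : Int) > (ones : Int) then
    (1 <<< L) - 1 - n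
  else
    -- .toNat on the shift amount is exact: every i of pyRange 0 L 2 has 0 ≤ i < L
    let mask : Int := (PySem.List.pyRange 0 (L : Int) 2).foldl
      (fun mask i => PySem.Int.bor mask (1 <<< (((L : Int) - 1 - i).toNat))) 0
    PySem.Int.bor n mask

-- ===== PRECONDITION & SPEC =====
-- Pre_ excludes negative n, on which A transforms the literal sliced string 'b101…'
-- (bin(n)[2:] keeps the 'b'), an accident of string slicing rather than a binary
-- transformation; B's arithmetic does the natural two's-complement thing there.
def Pre_f (n : Int) : Prop := 0 ≤ n
instance (n : Int) : Decidable (Pre_f n) := by unfold Pre_f; infer_instance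
def pvWitness_f : Int := 6
def Spec_f (n : Int) (out : Int) : Prop := out = f_alt n
instance (n : Int) (out : Int) : Decidable (Spec_f n out) := by unfold Spec_f; infer_instance

-- ===== CLAIM (what is proved, stated in full; the proofs are below) =====
def Claim_equal_f : Prop := ∀ (n : Int), Dom_f n → Pre_f n → Spec_f n (f n)

-- ===== LEMMAS AND PROOFS =====

-- bit value of a binary digit character
def pvBit (c : Char) : Nat := if c = '1' then 1 else 0

-- Nat-level value of a binary digit string (MSB first)
def pvVN (cs : List Char) : Nat := cs.foldl (fun a c => 2 * a + pvBit c) 0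

-- Nat-level mask: bits at even string indices of an L-character string
def pvMN : Nat → Nat
  | 0 => 0
  | L + 1 => 2 * pvMN L + (if L % 2 = 0 then 1 else 0)

-- force even string indices to '1'
def pvForce (cs : List Char) : List Char :=
  cs.zipIdx.map (fun p => if p.2 % 2 = 0 then '1' else p.1)

def pvAllBin (cs : List Char) : Prop := ∀ c ∈ cs, c = '0' ∨ c = '1'

theorem pvVN_foldl (cs : List Char) (a : Nat) :
    cs.foldl (fun a c => 2 * a + pvBit c) a = a * 2 ^ cs.length + pvVN cs := by
  induction cs generalizing a with
  | nil => simp [pvVN]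
  | cons c cs ih =>
    simp only [List.foldl_cons, List.length_cons]
    rw [ih]
    have h2 : pvVN (c :: cs) = (2 * 0 + pvBit c) * 2 ^ cs.length + pvVN cs := by
      simp only [pvVN, List.foldl_cons]; rw [ih]; rfl
    rw [h2]; ring

theorem pvVN_cons (c : Char) (cs : List Char) :
    pvVN (c :: cs) = pvBit c * 2 ^ cs.length + pvVN cs := by
  have h := pvVN_foldl cs (2 * 0 + pvBit c)
  simp only [pvVN, List.foldl_cons]
  rw [h, show 2 * 0 + pvBit c = pvBit c from by omega]
  rfl

theorem pvVN_snoc (cs : List Char) (c : Char) :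
    pvVN (cs ++ [c]) = 2 * pvVN cs + pvBit c := by
  simp only [pvVN, List.foldl_append, List.foldl_cons, List.foldl_nil]

theorem pvInt2_eq (cs : List Char) : pvInt2 cs = (pvVN cs : Int) := by
  have gen : ∀ (cs : List Char) (a : Nat),
      cs.foldl (fun x c => 2 * x + (if c = '1' then 1 else 0)) (a : Int)
        = ((cs.foldl (fun x c => 2 * x + pvBit c) a : Nat) : Int) := by
    intro cs
    induction cs with
    | nil => intro a; simp
    | cons c cs ih =>
      intro a
      simp only [List.foldl_cons]
      have : (2 * (a : Int) + (if c = '1' then 1 else 0)) = ((2 * a + pvBit c : Nat) : Int) := by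
        unfold pvBit; split_ifs <;> push_cast <;> ring
      rw [this, ih]
  simpa [pvInt2, pvVN] using gen cs 0

theorem pvFoldl_append_map {α : Type} (g : α → Char) (cs : List α) (a : List Char) :
    cs.foldl (fun acc r => acc ++ [g r]) a = a ++ cs.map g := by
  induction cs generalizing a with
  | nil => simp
  | cons x cs ih => simp [ih]

-- facts about Nat.toDigits 2
theorem pvAllBin_dig (m : Nat) : pvAllBin (Nat.toDigits 2 m) := by
  induction m using Nat.strong_induction_on with
  | _ m ih =>
    rw [Nat.toDigits_eq_if (by norm_num)]
    split_ifs with h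
    · interval_cases m <;> (intro c hc; simp only [List.mem_singleton] at hc; subst hc) <;> simp [Nat.digitChar]
    · intro c hc
      rcases List.mem_append.mp hc with h1 | h1
      · exact ih (m / 2) (by omega) c h1
      · simp only [List.mem_singleton] at h1; subst h1
        rcases Nat.mod_two_eq_zero_or_one m with h2 | h2 <;> rw [h2] <;> simp [Nat.digitChar]

theorem pvLen_dig (m : Nat) (hm : 0 < m) :
    (Nat.toDigits 2 m).length = PySem.Int.bitLength (m : Int) := by
  induction m using Nat.strong_induction_on with
  | _ m ih =>
    rw [Nat.toDigits_eq_if (by norm_num)]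
    split_ifs with h
    · interval_cases m
      decide
    · rw [List.length_append, List.length_singleton, ih (m / 2) (by omega) (by omega),
        PySem.Int.bitLength_natCast (by omega : 0 < m)]

theorem pvCount1_dig (m : Nat) (hm : 0 < m) :
    (Nat.toDigits 2 m).count '1' = PySem.Int.bitCount (m : Int) := by
  induction m using Nat.strong_induction_on with
  | _ m ih =>
    rw [Nat.toDigits_eq_if (by norm_num)]
    split_ifs with h
    · interval_cases m
      decide
    · rw [List.count_append, ih (m / 2) (by omega) (by omega),
        PySem.Int.bitCount_natCast (by omega : 0 < m)]
      rcases Nat.mod_two_eq_zero_or_one m with h2 | h2 <;> rw [h2] <;>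
        simp [Nat.digitChar] <;> omega

theorem pvVN_dig (m : Nat) : pvVN (Nat.toDigits 2 m) = m := by
  induction m using Nat.strong_induction_on with
  | _ m ih =>
    rw [Nat.toDigits_eq_if (by norm_num)]
    split_ifs with h
    · interval_cases m <;> decide
    · rw [pvVN_snoc, ih (m / 2) (by omega)]
      rcases Nat.mod_two_eq_zero_or_one m with h2 | h2 <;> rw [h2] <;>
        simp [Nat.digitChar, pvBit] <;> omega

theorem pvCount_add (cs : List Char) (h : pvAllBin cs) :
    cs.count '0' + cs.count '1' = cs.length := by
  induction cs with
  | nil => simp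
  | cons c cs ih =>
    have hc := h c List.mem_cons_self
    have ht : pvAllBin cs := fun x hx => h x (List.mem_cons_of_mem _ hx)
    have := ih ht
    rcases hc with h1 | h1 <;> subst h1 <;> simp <;> omega

-- invert branch
theorem pvVN_inv (cs : List Char) (h : pvAllBin cs) :
    pvVN (cs.map (fun r => if r = '1' then '0' else '1')) + pvVN cs + 1 = 2 ^ cs.length := by
  induction cs with
  | nil => simp [pvVN]
  | cons c cs ih =>
    have hc := h c List.mem_cons_self
    have ht : pvAllBin cs := fun x hx => h x (List.mem_cons_of_mem _ hx)
    have hih := ih ht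
    simp only [List.map_cons]
    rw [pvVN_cons, pvVN_cons, List.length_map, List.length_cons, pow_succ]
    rcases hc with h1 | h1 <;> subst h1 <;> simp [pvBit] <;> omega

-- bit doubling lemma for OR
theorem pvLor_double (a b c d : Nat) (hb : b < 2) (hd : d < 2) :
    (2 * a + b) ||| (2 * c + d) = 2 * (a ||| c) + (b ||| d) := by
  apply Nat.eq_of_testBit_eq
  intro i
  cases i with
  | zero =>
    rw [Nat.testBit_lor, Nat.testBit_zero, Nat.testBit_zero, Nat.testBit_zero]
    interval_cases b <;> interval_cases d <;> simp
  | succ i =>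
    rw [Nat.testBit_lor, Nat.testBit_add_one, Nat.testBit_add_one, Nat.testBit_add_one,
      Nat.mul_add_div (by norm_num), Nat.mul_add_div (by norm_num), Nat.mul_add_div (by norm_num)]
    rw [Nat.div_eq_of_lt hb, Nat.div_eq_of_lt hd, Nat.div_eq_of_lt (by interval_cases b <;> interval_cases d <;> decide : b ||| d < 2)]
    simp

theorem pvLor_pow (s q : Nat) (h : 2 ^ (s + 1) ∣ q) : q ||| 2 ^ s = q + 2 ^ s := by
  induction s generalizing q with
  | zero =>
    obtain ⟨q', rfl⟩ := h
    have h1 : 2 ^ (0 + 1) * q' = 2 * (2 ^ 0 * q') + 0 := by ring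
    have h2 : (2 ^ 0 : Nat) = 2 * 0 + 1 := by norm_num
    rw [h1, h2, pvLor_double _ _ _ _ (by omega) (by omega)]
    simp
  | succ s ih =>
    obtain ⟨q', rfl⟩ := h
    have key := pvLor_double (2 ^ (s + 1) * q') 0 (2 ^ s) 0 (by omega) (by omega)
    have e1 : 2 * (2 ^ (s + 1) * q') + 0 = 2 ^ (s + 1 + 1) * q' := by ring
    have e2 : 2 * 2 ^ s + 0 = 2 ^ (s + 1) := by ring
    rw [e1, e2] at key
    rw [key, ih (2 ^ (s + 1) * q') ⟨q', by ring⟩]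
    simp only [Nat.zero_or]
    ring

theorem pvForce_snoc (cs : List Char) (c : Char) :
    pvForce (cs ++ [c]) = pvForce cs ++ [if cs.length % 2 = 0 then '1' else c] := by
  simp [pvForce, List.zipIdx_append]

-- the main branch-2 induction
theorem pvForce_dig (m : Nat) (hm : 0 < m) :
    pvVN (pvForce (Nat.toDigits 2 m)) = m ||| pvMN (Nat.toDigits 2 m).length := by
  induction m using Nat.strong_induction_on with
  | _ m ih =>
    rw [Nat.toDigits_eq_if (by norm_num)]
    split_ifs with h
    · interval_cases m
      decide
    · set a := m / 2 with ha
      rw [pvForce_snoc, pvVN_snoc, ih a (by omega) (by omega),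
        List.length_append, List.length_singleton, pvMN]
      set L := (Nat.toDigits 2 a).length with hL
      rcases Nat.mod_two_eq_zero_or_one L with h2 | h2 <;>
        rcases Nat.mod_two_eq_zero_or_one m with h3 | h3 <;>
          rw [h3] <;> simp only [h2] <;> norm_num <;>
          rw [show m = 2 * a + m % 2 from by omega, h3] <;>
          [skip; skip;
           rw [show (2 : Nat) * pvMN L = 2 * pvMN L + 0 from by omega];
           rw [show (2 : Nat) * pvMN L = 2 * pvMN L + 0 from by omega]] <;>
          rw [pvLor_double a _ (pvMN L) _ (by omega) (by omega)] <;>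
          norm_num [pvBit, Nat.digitChar] <;> decide


def pvSN (L j : Nat) : Nat := (List.range j).foldl (fun acc k => acc + 2 ^ (L - 1 - 2 * k)) 0

theorem pvSN_succ (L j : Nat) : pvSN L (j + 1) = pvSN L j + 2 ^ (L - 1 - 2 * j) := by
  simp [pvSN, List.range_succ]

theorem pvSN_dvd (L : Nat) : ∀ j, j ≤ (L + 1) / 2 → 2 ^ (L + 1 - 2 * j) ∣ pvSN L j := by
  intro j
  induction j with
  | zero => intro _; simp [pvSN]
  | succ j ih =>
    intro hj
    rw [pvSN_succ]
    have h1 : L + 1 - 2 * (j + 1) = L - 1 - 2 * j := by omega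
    rw [h1]
    exact Nat.dvd_add
      (dvd_trans (pow_dvd_pow 2 (by omega)) (ih (by omega))) dvd_rfl

theorem pvSN_double (L : Nat) : ∀ j, j ≤ (L + 1) / 2 → pvSN (L + 1) j = 2 * pvSN L j := by
  intro j
  induction j with
  | zero => intro _; simp [pvSN]
  | succ j ih =>
    intro hj
    rw [pvSN_succ, pvSN_succ, ih (by omega), Nat.mul_add]
    congr 1
    rw [show L + 1 - 1 - 2 * j = (L - 1 - 2 * j) + 1 from by omega, pow_succ]
    ring

theorem pvSN_MN (L : Nat) : pvSN L ((L + 1) / 2) = pvMN L := by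
  induction L with
  | zero => simp [pvSN, pvMN]
  | succ L ih =>
    rcases Nat.mod_two_eq_zero_or_one L with h | h
    · rw [show (L + 1 + 1) / 2 = (L + 1) / 2 + 1 from by omega, pvSN_succ,
        pvSN_double L _ le_rfl, ih, pvMN,
        show L + 1 - 1 - 2 * ((L + 1) / 2) = 0 from by omega, h]
      simp
    · rw [show (L + 1 + 1) / 2 = (L + 1) / 2 from by omega,
        pvSN_double L _ le_rfl, ih, pvMN, h]
      simp

-- B's mask fold equals the Nat mask
theorem pvMask_eq (L : Nat) :
    (PySem.List.pyRange 0 (L : Int) 2).foldl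
      (fun mask i => PySem.Int.bor mask (1 <<< (((L : Int) - 1 - i).toNat))) 0 = (pvMN L : Int) := by
  rw [PySem.List.pyRange_of_pos _ _ (by norm_num)]
  rw [show (if (0:Int) < (L:Int) then (((L:Int) - 0 + 2 - 1) / 2).toNat else 0) = (L + 1) / 2 from by
    split_ifs <;> omega]
  rw [List.foldl_map]
  have main : ∀ j, j ≤ (L + 1) / 2 →
      (List.range j).foldl
        (fun acc k => PySem.Int.bor acc (1 <<< (((L : Int) - 1 - ((0 : Int) + 2 * (k : Nat))).toNat))) 0
        = (pvSN L j : Int) := by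
    intro j
    induction j with
    | zero => simp [pvSN]
    | succ j ih =>
      intro hj
      rw [List.range_succ, List.foldl_append, ih (by omega), List.foldl_cons, List.foldl_nil]
      have he : (((L : Int) - 1 - ((0 : Int) + 2 * (j : Nat))).toNat) = L - 1 - 2 * j := by omega
      rw [he, Nat.one_shiftLeft, PySem.Int.bor_natCast]
      rw [pvLor_pow _ _ (dvd_trans (pow_dvd_pow 2 (by omega : L - 1 - 2 * j + 1 ≤ L + 1 - 2 * j)) (pvSN_dvd L j (by omega))), pvSN_succ]
  rw [main _ le_rfl, pvSN_MN]

-- ===== VERDICT (by name: the statement is the Claim_ definition above) =====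
set_option maxRecDepth 4096 in
theorem f_spec : Claim_equal_f := by
  unfold Claim_equal_f
  intro n _ hpre
  unfold Spec_f
  have hn : (0:Int) ≤ n := hpre
  obtain ⟨m, rfl⟩ : ∃ m : Nat, n = (m : Int) := ⟨n.toNat, (Int.toNat_of_nonneg hn).symm⟩
  by_cases hm : m = 0
  · subst hm; decide
  · have hm0 : 0 < m := Nat.pos_of_ne_zero hm
    have hbin : PySem.List.slice (PySem.Int.toBinChars0b (m : Int)) (some 2) none
        = Nat.toDigits 2 m := by
      rw [show (2:Int) = ((2:Nat):Int) from rfl, PySem.List.slice_from_natCast]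
      simp [PySem.Int.toBinChars0b, not_lt.mpr (Int.natCast_nonneg m)]
    have hall := pvAllBin_dig m
    have hlen := pvLen_dig m hm0
    have hcnt1 := pvCount1_dig m hm0
    have hsum := pvCount_add (Nat.toDigits 2 m) hall
    have hvn := pvVN_dig m
    have hL1 : 1 ≤ PySem.Int.bitLength (m : Int) := by
      rw [PySem.Int.bitLength_natCast hm0]; omega
    have hmax : max (PySem.Int.bitLength (m : Int)) 1 = PySem.Int.bitLength (m : Int) := by
      omega
    have hcond : ((Nat.toDigits 2 m).count '0' > (Nat.toDigits 2 m).count '1') ↔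
        ((PySem.Int.bitLength (m : Int) : Int) - (PySem.Int.bitCount (m : Int) : Int)
          > (PySem.Int.bitCount (m : Int) : Int)) := by
      rw [← hcnt1, ← hlen]
      constructor <;> intro h <;> omega
    unfold f f_alt
    simp only [hbin]
    rw [hmax]
    by_cases hc : (Nat.toDigits 2 m).count '0' > (Nat.toDigits 2 m).count '1'
    · rw [if_pos hc, if_pos (hcond.mp hc)]
      rw [pvFoldl_append_map, List.nil_append, pvInt2_eq]
      have hinv := pvVN_inv (Nat.toDigits 2 m) hall
      have hnat := hinv
      rw [hvn] at hnat
      have hvni : ((pvVN ((Nat.toDigits 2 m).map fun r => if r = '1' then '0' else '1') : Nat) : Int)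
          + (m : Int) + 1 = ((2 ^ PySem.Int.bitLength (m : Int) : Nat) : Int) := by
        rw [← hlen]
        exact_mod_cast hnat
      rw [Nat.one_shiftLeft]
      omega
    · rw [if_neg hc, if_neg (fun h => hc (hcond.mpr h)),
        if_pos (Nat.le_of_not_lt hc)]
      rw [pvFoldl_append_map, List.nil_append]
      have hforce : (PySem.List.enumerate (Nat.toDigits 2 m) 0).map
          (fun p => if PySem.Int.mod p.1 2 = 0 then '1' else p.2) = pvForce (Nat.toDigits 2 m) := by
        rw [PySem.List.enumerate_eq_zipIdx_map, List.map_map, pvForce]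
        apply List.map_congr_left
        intro p _
        have h1 : PySem.Int.mod ((0:Int) + (p.2 : Int)) 2 = ((p.2 % 2 : Nat) : Int) := by
          rw [zero_add, show (2:Int) = ((2:Nat):Int) from rfl, PySem.Int.mod_natCast]
        simp only [Function.comp, h1, Nat.cast_eq_zero]
      rw [hforce, pvInt2_eq, pvForce_dig m hm0, pvMask_eq, PySem.Int.bor_natCast, hlen]
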